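-- pv_equiv track=rewrite | github.com/pabissonnier/project8__purbeurre | answer/models.py | get_better_nutriscore
-- ===== SOURCE A (Python) =====
-- def get_better_nutriscore(product_nutriscore):
--     """ Gets better nutriscore, if 'c' = 'a', 'b', if doesn't exist higher, take the same NC"""
--     nutriscore_list = ['a', 'b', 'c', 'd', 'e']
--     better_nutriscores_list = []
--     if product_nutriscore in nutriscore_list:
--         nutriscore_position = nutriscore_list.index(product_nutriscore) + 1
--         nutriscores_wanted = nutriscore_list[:nutriscore_position]
--         for elements in nutriscores_wanted:
--             better_nutriscores_list.append(elements)
--     elif product_nutriscore == nutriscore_list[0]: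
--         nutriscores_wanted = nutriscore_list[0]
--         better_nutriscores_list.append(nutriscores_wanted)
--     return better_nutriscores_list
-- ===== SOURCE B (Python) =====
-- def get_better_nutriscore(product_nutriscore):
--     grades = ['a', 'b', 'c', 'd', 'e']
--     if product_nutriscore not in grades:
--         return []
--     return [g for g in grades if g <= product_nutriscore]
-- ===== Notes on version B (the rewrite author's own statement) =====
-- stated objective: simpler
-- what changed: Replaces index-lookup + slice + element-copy loop with an early membership guard and a single ordering-based filter (g <= product_nutriscore) over the grade list.
import Mathlib
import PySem

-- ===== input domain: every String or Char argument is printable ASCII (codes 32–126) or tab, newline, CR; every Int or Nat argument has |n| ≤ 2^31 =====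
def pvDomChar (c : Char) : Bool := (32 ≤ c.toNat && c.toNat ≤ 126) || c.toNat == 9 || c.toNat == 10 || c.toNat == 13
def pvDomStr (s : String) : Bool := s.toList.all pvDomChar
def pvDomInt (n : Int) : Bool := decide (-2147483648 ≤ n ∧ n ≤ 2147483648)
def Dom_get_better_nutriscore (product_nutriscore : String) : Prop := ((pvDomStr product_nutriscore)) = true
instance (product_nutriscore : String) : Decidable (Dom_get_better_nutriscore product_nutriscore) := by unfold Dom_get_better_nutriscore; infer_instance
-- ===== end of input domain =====

-- ===== PORT A =====
-- B: membership guard + ordering filter instead of index+slice+copy loop (simpler).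
def get_better_nutriscore (product_nutriscore : String) : List String :=
  let nutriscore_list := ["a", "b", "c", "d", "e"]
  let better_nutriscores_list : List String := []
  if nutriscore_list.contains product_nutriscore then
    let nutriscore_position : Int := ((PySem.List.index? nutriscore_list product_nutriscore).getD 0) + 1
    let nutriscores_wanted := PySem.List.slice nutriscore_list none (some nutriscore_position)
    nutriscores_wanted.foldl (fun acc e => acc ++ [e]) better_nutriscores_list
  else if product_nutriscore == ((PySem.List.pyGet? nutriscore_list 0).getD "") then
    let nutriscores_wanted := (PySem.List.pyGet? nutriscore_list 0).getD ""
    better_nutriscores_list ++ [nutriscores_wanted]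
  else
    better_nutriscores_list

-- ===== PORT B =====
def get_better_nutriscore_alt (product_nutriscore : String) : List String :=
  let grades := ["a", "b", "c", "d", "e"]
  if !(grades.contains product_nutriscore) then []
  else grades.filter (fun g => !PySem.Chars.strLt product_nutriscore.toList g.toList)  -- g <= product_nutriscore

-- ===== PRECONDITION & SPEC =====
def Spec_get_better_nutriscore (product_nutriscore : String) (out : List String) : Prop := out = get_better_nutriscore_alt product_nutriscore
instance (product_nutriscore : String) (out : List String) : Decidable (Spec_get_better_nutriscore product_nutriscore out) := by unfold Spec_get_better_nutriscore; infer_instance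

-- ===== CLAIM (what is proved, stated in full; the proofs are below) =====
def Claim_equal_get_better_nutriscore : Prop := ∀ (product_nutriscore : String), Dom_get_better_nutriscore product_nutriscore → Spec_get_better_nutriscore product_nutriscore (get_better_nutriscore product_nutriscore)

-- ===== LEMMAS AND PROOFS =====

-- ===== VERDICT (by name: the statement is the Claim_ definition above) =====
theorem get_better_nutriscore_spec : Claim_equal_get_better_nutriscore := by
  intro p _
  unfold Spec_get_better_nutriscore
  by_cases h : p ∈ ["a", "b", "c", "d", "e"]
  · simp only [List.mem_cons, List.not_mem_nil, or_false] at h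
    rcases h with h | h | h | h | h <;> subst h <;> decide
  · have h5 : p ≠ "a" ∧ p ≠ "b" ∧ p ≠ "c" ∧ p ≠ "d" ∧ p ≠ "e" := by
      simp only [List.mem_cons, List.not_mem_nil, or_false, not_or] at h
      exact h
    obtain ⟨h1, h2, h3, h4, h5⟩ := h5
    simp [get_better_nutriscore, get_better_nutriscore_alt, h1, h2, h3, h4, h5]
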